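-- pv_equiv track=rewrite | github.com/ronitdasgupta/Yummyv2 | Yummy!v2.py | checkIfIngredientInList
-- ===== SOURCE A (Python) =====
-- def checkIfIngredientInList(ingredient, list):
--     try:
--         for item in list:
--             for item in list:
--                 findValue = item.get("Ingredient")
--                 if findValue == ingredient:
--                     return True
--                 else:
--                     continue
--                     #return False
--         return False
--     except:
--         return False
-- ===== SOURCE B (Python) =====
-- def checkIfIngredientInList(ingredient, list):
--     try:
--         return any(item.get("Ingredient") == ingredient for item in list)
--     except:
--         return False
-- ===== Notes on version B (the rewrite author's own statement) =====
-- stated objective: simpler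
-- what changed: Replaced A's redundant nested double scan (the outer loop just re-runs the same inner scan over the whole list) with a single linear any() pass over the list.
import Mathlib
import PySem

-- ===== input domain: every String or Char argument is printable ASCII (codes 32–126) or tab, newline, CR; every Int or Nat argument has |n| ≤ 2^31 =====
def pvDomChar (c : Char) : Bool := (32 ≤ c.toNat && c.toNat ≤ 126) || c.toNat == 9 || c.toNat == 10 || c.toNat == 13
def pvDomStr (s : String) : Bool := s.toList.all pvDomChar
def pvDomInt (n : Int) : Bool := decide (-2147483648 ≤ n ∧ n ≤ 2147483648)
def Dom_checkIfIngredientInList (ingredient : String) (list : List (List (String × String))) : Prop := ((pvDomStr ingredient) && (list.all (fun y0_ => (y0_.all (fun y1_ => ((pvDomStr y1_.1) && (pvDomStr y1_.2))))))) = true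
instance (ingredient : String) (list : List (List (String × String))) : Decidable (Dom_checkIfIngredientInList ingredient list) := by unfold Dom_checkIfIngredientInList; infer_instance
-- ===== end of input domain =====

-- B replaces A's redundant nested double scan with a single linear `any` pass; same result.

-- ===== PORT A =====
-- inner loop of A: scans the whole list, returns True at the first dict whose
-- "Ingredient" value equals `ingredient`, else falls through (False).
def pvInnerA (ingredient : String) : List (List (String × String)) → Bool
  | [] => false
  | item :: rest =>
    if (PySem.Dict.mk item).get? "Ingredient" = some ingredient then true
    else pvInnerA ingredient rest

-- outer loop of A: for each item of `list` (the item itself unused, shadowed),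
-- runs the inner scan over the full `list`; returns False after the loop.
def pvOuterA (ingredient : String) (list : List (List (String × String))) : List (List (String × String)) → Bool
  | [] => false
  | _ :: rest =>
    if pvInnerA ingredient list then true
    else pvOuterA ingredient list rest

def checkIfIngredientInList (ingredient : String) (list : List (List (String × String))) : Bool :=
  pvOuterA ingredient list list

-- ===== PORT B =====
def checkIfIngredientInList_alt (ingredient : String) (list : List (List (String × String))) : Bool :=
  list.any (fun item => (PySem.Dict.mk item).get? "Ingredient" = some ingredient)

-- ===== PRECONDITION & SPEC =====
def Spec_checkIfIngredientInList (ingredient : String) (list : List (List (String × String))) (out : Bool) : Prop := out = checkIfIngredientInList_alt ingredient list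
instance (ingredient : String) (list : List (List (String × String))) (out : Bool) : Decidable (Spec_checkIfIngredientInList ingredient list out) := by unfold Spec_checkIfIngredientInList; infer_instance

-- ===== CLAIM (what is proved, stated in full; the proofs are below) =====
def Claim_equal_checkIfIngredientInList : Prop := ∀ (ingredient : String) (list : List (List (String × String))), Dom_checkIfIngredientInList ingredient list → Spec_checkIfIngredientInList ingredient list (checkIfIngredientInList ingredient list)

-- ===== LEMMAS AND PROOFS =====
theorem pvInnerA_eq_any (ingredient : String) (xs : List (List (String × String))) :
    pvInnerA ingredient xs = xs.any (fun item => (PySem.Dict.mk item).get? "Ingredient" = some ingredient) := by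
  induction xs with
  | nil => rfl
  | cons x rest ih => simp [pvInnerA, List.any_cons, ih]

theorem pvOuterA_eq (ingredient : String) (list rest : List (List (String × String))) :
    pvOuterA ingredient list rest = (if rest = [] then false else pvInnerA ingredient list) := by
  induction rest with
  | nil => rfl
  | cons x r ih => simp [pvOuterA, ih]

-- ===== VERDICT (by name: the statement is the Claim_ definition above) =====
theorem checkIfIngredientInList_spec : Claim_equal_checkIfIngredientInList := by
  intro ingredient list _
  unfold Spec_checkIfIngredientInList checkIfIngredientInList checkIfIngredientInList_alt
  rw [pvOuterA_eq, ← pvInnerA_eq_any]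
  cases list with
  | nil => rfl
  | cons x r => simp [pvInnerA_eq_any]
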